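-- pv_equiv track=rewrite | github.com/shinee22301617/Password-Strength-Evaluator | app.py | cal_adj_mean
-- ===== SOURCE A (Python) =====
-- def cal_adj_mean(x):
--   #detect strings like abcde, 01234
--   x=str(x)
--   cnt = 0
--   pos_alphabet = -1
--   value_alphabet = 0
--   lastpos_alphabet = -1
--   pos_number = -1
--   value_number = 0
--   lastpos_number = -1
--   value = 0
--   for i in x:
--     if(i.isnumeric()):
--       pos_number = ord(i)
--       if(lastpos_number!=-1):
--         value_number = value_number + abs(pos_number-lastpos_number)
--       lastpos_number = pos_number
--     else:
--       if(i.islower()):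
--         pos_alphabet = ord(i) - 97
--         if(lastpos_alphabet!=-1):
--           value_alphabet = value_alphabet + abs(pos_alphabet-lastpos_alphabet)
--         lastpos_alphabet = pos_alphabet
--       if(i.isupper()):
--         pos_alphabet = ord(i) - 65
--         if(lastpos_alphabet!=-1):
--           value_alphabet = value_alphabet + abs(pos_alphabet-lastpos_alphabet)
--         lastpos_alphabet = pos_alphabet
--   value = value_alphabet+value_number
--   return value
-- ===== SOURCE B (Python) =====
-- def cal_adj_mean(x):
--   # two-phase: extract the alpha/number value sequences, then sum adjacent abs-diffs
--   x = str(x)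
--   alpha = []
--   nums = []
--   for c in x:
--     if c.isnumeric():
--       nums.append(ord(c))
--     elif c.islower():
--       alpha.append(ord(c) - 97)
--     elif c.isupper():
--       alpha.append(ord(c) - 65)
--   return sum(abs(a - b) for a, b in zip(alpha, alpha[1:])) \
--        + sum(abs(a - b) for a, b in zip(nums, nums[1:]))
-- ===== Notes on version B (the rewrite author's own statement) =====
-- stated objective: alternative
-- what changed: Replaces the single interleaved loop with four sentinel/accumulator variables by a two-phase shape: one pass extracts the ordered letter-value and digit-value lists, then each adjacent absolute difference is summed over zip(l, l[1:]).
import Mathlib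
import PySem

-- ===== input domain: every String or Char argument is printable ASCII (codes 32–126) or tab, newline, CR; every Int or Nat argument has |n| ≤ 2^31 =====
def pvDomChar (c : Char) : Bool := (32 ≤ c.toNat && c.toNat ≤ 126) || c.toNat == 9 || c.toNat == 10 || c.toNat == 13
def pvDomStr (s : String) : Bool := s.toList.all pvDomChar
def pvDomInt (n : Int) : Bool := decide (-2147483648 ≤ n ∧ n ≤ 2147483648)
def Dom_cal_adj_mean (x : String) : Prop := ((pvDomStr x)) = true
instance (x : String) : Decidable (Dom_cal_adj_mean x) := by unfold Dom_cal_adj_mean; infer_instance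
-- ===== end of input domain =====

-- B replaces A's single interleaved sentinel-accumulator loop by a two-phase shape:
-- extract the letter/digit value lists, then sum adjacent absolute differences (objective: alternative).
-- i.isnumeric() is ported as PySem.Chars.isdigit, exact on the printable-ASCII domain.

-- ===== PORT A =====
-- the two `if` blocks of A's else branch, updating (pos/lastpos_alphabet, value_alphabet)
def pvStepAlpha (c : Char) (la va : Int) : Int × Int :=
  let p1 := if PySem.Chars.islower c then
              (((c.toNat : Int) - 97), if la ≠ -1 then va + |((c.toNat : Int) - 97) - la| else va)
            else (la, va)
  if PySem.Chars.isupper c then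
    (((c.toNat : Int) - 65), if p1.1 ≠ -1 then p1.2 + |((c.toNat : Int) - 65) - p1.1| else p1.2)
  else p1

-- A's for-loop; state = (lastpos_alphabet, value_alphabet, lastpos_number, value_number)
def pvLoopA : List Char → Int → Int → Int → Int → Int × Int × Int × Int
  | [], la, va, ln, vn => (la, va, ln, vn)
  | c :: rest, la, va, ln, vn =>
    if PySem.Chars.isdigit c then
      pvLoopA rest la va (c.toNat : Int) (if ln ≠ -1 then vn + |((c.toNat : Int)) - ln| else vn)
    else
      pvLoopA rest (pvStepAlpha c la va).1 (pvStepAlpha c la va).2 ln vn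

def cal_adj_mean (x : String) : Int :=
  let r := pvLoopA x.toList (-1) 0 (-1) 0
  r.2.1 + r.2.2.2

-- ===== PORT B =====
-- sum(abs(a-b) for a,b in zip(l, l[1:]))
def pvAdjSum (l : List Int) : Int := ((l.zip l.tail).map (fun p => |p.1 - p.2|)).sum

-- B's extraction pass: appends to alpha / nums in order
def pvExtract : List Char → List Int → List Int → List Int × List Int
  | [], alpha, nums => (alpha, nums)
  | c :: rest, alpha, nums =>
    if PySem.Chars.isdigit c then pvExtract rest alpha (nums ++ [(c.toNat : Int)])
    else if PySem.Chars.islower c then pvExtract rest (alpha ++ [(c.toNat : Int) - 97]) nums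
    else if PySem.Chars.isupper c then pvExtract rest (alpha ++ [(c.toNat : Int) - 65]) nums
    else pvExtract rest alpha nums

def cal_adj_mean_alt (x : String) : Int :=
  let r := pvExtract x.toList [] []
  pvAdjSum r.1 + pvAdjSum r.2

-- ===== PRECONDITION & SPEC =====
def Spec_cal_adj_mean (x : String) (out : Int) : Prop := out = cal_adj_mean_alt x
instance (x : String) (out : Int) : Decidable (Spec_cal_adj_mean x out) := by unfold Spec_cal_adj_mean; infer_instance

-- ===== CLAIM (what is proved, stated in full; the proofs are below) =====
def Claim_equal_cal_adj_mean : Prop := ∀ (x : String), Dom_cal_adj_mean x → Spec_cal_adj_mean x (cal_adj_mean x)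

-- ===== LEMMAS AND PROOFS =====

theorem pvAdjSum_nil : pvAdjSum [] = 0 := rfl

theorem pvAdjSum_cons_cons (a b : Int) (t : List Int) :
    pvAdjSum (a :: b :: t) = |a - b| + pvAdjSum (b :: t) := by
  simp [pvAdjSum]

theorem pvAdjSum_append (l : List Int) (x : Int) (h : l ≠ []) (d : Int) :
    pvAdjSum (l ++ [x]) = pvAdjSum l + |x - l.getLastD d| := by
  induction l with
  | nil => exact absurd rfl h
  | cons a t ih =>
    cases t with
    | nil =>
      simp [pvAdjSum, abs_sub_comm]
    | cons b t' =>
      have : (a :: b :: t') ++ [x] = a :: ((b :: t') ++ [x]) := rfl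
      rw [this]
      have h2 : (b :: t') ++ [x] = b :: (t' ++ [x]) := rfl
      rw [h2, pvAdjSum_cons_cons, ← h2, ih (by simp)]
      rw [pvAdjSum_cons_cons]
      have : (a :: b :: t').getLastD d = (b :: t').getLastD d := by
        simp
      rw [this]; ring

theorem getLastD_pos_default (l : List Int) (d : Int) (hd : 0 ≤ d) (hp : ∀ a ∈ l, 0 ≤ a) :
    0 ≤ l.getLastD d := by
  induction l generalizing d with
  | nil => simpa
  | cons a t ih =>
    rw [List.getLastD_cons]
    exact ih a (hp a (by simp)) (fun x hx => hp x (by simp [hx]))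

theorem getLastD_nonneg (l : List Int) (h : l ≠ []) (hp : ∀ a ∈ l, 0 ≤ a) :
    0 ≤ l.getLastD (-1) := by
  cases l with
  | nil => exact absurd rfl h
  | cons a t =>
    rw [List.getLastD_cons]
    exact getLastD_pos_default t a (hp a (by simp)) (fun x hx => hp x (by simp [hx]))

-- the sentinel test of A equals B's append-based adjacent sum
theorem sentinel_step (l : List Int) (x : Int) (hp : ∀ a ∈ l, 0 ≤ a) :
    (if l.getLastD (-1) ≠ -1 then pvAdjSum l + |x - l.getLastD (-1)| else pvAdjSum l)
      = pvAdjSum (l ++ [x]) := by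
  cases l with
  | nil => simp [pvAdjSum]
  | cons a t =>
    have hne : (a :: t) ≠ ([] : List Int) := by simp
    have h0 : 0 ≤ (a :: t).getLastD (-1) := getLastD_nonneg _ hne hp
    have hs : (a :: t).getLastD (-1) ≠ -1 := by omega
    rw [if_pos hs, pvAdjSum_append _ x hne (-1)]

theorem islower_not_isupper {c : Char} (h : PySem.Chars.islower c = true) :
    PySem.Chars.isupper c = false := by
  simp only [PySem.Chars.islower, PySem.Chars.isupper, Bool.and_eq_true, decide_eq_true_eq,
    Char.le_def, UInt32.le_iff_toNat_le] at *
  have h1 := h.1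
  have e : ('a').val.toNat = 97 := rfl
  have e2 : ('Z').val.toNat = 90 := rfl
  rw [e] at h1
  rw [Bool.and_eq_false_iff]
  right
  rw [decide_eq_false_iff_not, e2]
  omega

theorem islower_ge {c : Char} (h : PySem.Chars.islower c = true) : 97 ≤ (c.toNat : Int) := by
  simp only [PySem.Chars.islower, Bool.and_eq_true, decide_eq_true_eq, Char.le_def,
    UInt32.le_iff_toNat_le] at h
  have h1 := h.1
  have e : ('a').val.toNat = 97 := rfl
  rw [e] at h1
  unfold Char.toNat
  omega

theorem isupper_ge {c : Char} (h : PySem.Chars.isupper c = true) : 65 ≤ (c.toNat : Int) := by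
  simp only [PySem.Chars.isupper, Bool.and_eq_true, decide_eq_true_eq, Char.le_def,
    UInt32.le_iff_toNat_le] at h
  have h1 := h.1
  have e : ('A').val.toNat = 65 := rfl
  rw [e] at h1
  unfold Char.toNat
  omega

theorem pvLoopA_inv : ∀ (cs : List Char) (alpha nums : List Int),
    (∀ a ∈ alpha, 0 ≤ a) → (∀ a ∈ nums, 0 ≤ a) →
    pvLoopA cs (alpha.getLastD (-1)) (pvAdjSum alpha) (nums.getLastD (-1)) (pvAdjSum nums)
      = ((pvExtract cs alpha nums).1.getLastD (-1), pvAdjSum (pvExtract cs alpha nums).1,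
         (pvExtract cs alpha nums).2.getLastD (-1), pvAdjSum (pvExtract cs alpha nums).2) := by
  intro cs
  induction cs with
  | nil => intro alpha nums _ _; simp [pvLoopA, pvExtract]
  | cons c rest ih =>
    intro alpha nums ha hn
    by_cases hd : PySem.Chars.isdigit c = true
    · -- digit branch
      have hp : (0 : Int) ≤ (c.toNat : Int) := Int.natCast_nonneg _
      have hn' : ∀ a ∈ nums ++ [(c.toNat : Int)], 0 ≤ a := by
        intro a hm
        rcases List.mem_append.mp hm with h | h
        · exact hn a h
        · simp at h; omega
      rw [pvLoopA, pvExtract]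
      rw [if_pos hd, if_pos hd]
      rw [sentinel_step nums _ hn]
      have H := ih alpha (nums ++ [(c.toNat : Int)]) ha hn'
      rw [show ((nums ++ [(c.toNat : Int)]).getLastD (-1)) = (c.toNat : Int) by simp] at H
      exact H
    · -- non-digit
      rw [pvLoopA, pvExtract]
      rw [if_neg hd, if_neg hd]
      by_cases hl : PySem.Chars.islower c = true
      · have hu := islower_not_isupper hl
        have h97 := islower_ge hl
        have hstep : pvStepAlpha c (alpha.getLastD (-1)) (pvAdjSum alpha)
            = (((c.toNat : Int) - 97), pvAdjSum (alpha ++ [(c.toNat : Int) - 97])) := by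
          simp only [pvStepAlpha, hl, hu, if_true, if_false, Bool.false_eq_true]
          rw [← sentinel_step alpha _ ha]
        rw [hstep, if_pos hl]
        have ha' : ∀ a ∈ alpha ++ [(c.toNat : Int) - 97], 0 ≤ a := by
          intro a hm
          rcases List.mem_append.mp hm with h | h
          · exact ha a h
          · simp at h; omega
        have H := ih (alpha ++ [(c.toNat : Int) - 97]) nums ha' hn
        rw [show ((alpha ++ [(c.toNat : Int) - 97]).getLastD (-1)) = (c.toNat : Int) - 97 by simp] at H
        exact H
      · rw [if_neg hl]
        by_cases hup : PySem.Chars.isupper c = true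
        · have h65 := isupper_ge hup
          have hstep : pvStepAlpha c (alpha.getLastD (-1)) (pvAdjSum alpha)
              = (((c.toNat : Int) - 65), pvAdjSum (alpha ++ [(c.toNat : Int) - 65])) := by
            simp only [pvStepAlpha, hl, hup, if_true, if_false, Bool.false_eq_true]
            rw [← sentinel_step alpha _ ha]
          rw [hstep, if_pos hup]
          have ha' : ∀ a ∈ alpha ++ [(c.toNat : Int) - 65], 0 ≤ a := by
            intro a hm
            rcases List.mem_append.mp hm with h | h
            · exact ha a h
            · simp at h; omega
          have H := ih (alpha ++ [(c.toNat : Int) - 65]) nums ha' hn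
          rw [show ((alpha ++ [(c.toNat : Int) - 65]).getLastD (-1)) = (c.toNat : Int) - 65 by simp] at H
          exact H
        · have hstep : pvStepAlpha c (alpha.getLastD (-1)) (pvAdjSum alpha)
              = (alpha.getLastD (-1), pvAdjSum alpha) := by
            simp [pvStepAlpha, hl, hup]
          rw [hstep, if_neg hup]
          exact ih alpha nums ha hn

-- ===== VERDICT (by name: the statement is the Claim_ definition above) =====
theorem cal_adj_mean_spec : Claim_equal_cal_adj_mean := by
  intro x _
  unfold Spec_cal_adj_mean cal_adj_mean cal_adj_mean_alt
  have h := pvLoopA_inv x.toList [] [] (by simp) (by simp)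
  simp only [List.getLastD_nil, pvAdjSum_nil] at h
  rw [h]
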